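-- pv_equiv track=rewrite | github.com/steventhan/code-katas | string_pyramid.py | count_all_characters_of_the_pyramid
-- ===== SOURCE A (Python) =====
-- def get_side_lines(characters):
--     """Get pyramid side lines."""
--     if len(characters) < 1:
--         raise ValueError('Pyramid can only be built with non-empty string.')
--     lines = []
--     num_characters = 1
--     while len(characters) >= 1:
--         lines.append(characters[-1] * num_characters)
--         num_characters += 2
--         characters = characters[:-1]
--     return lines
--
-- def count_all_characters_of_the_pyramid(characters):
--     """Returns number of all chars."""
--     if not characters:
--         return -1
--     lines = get_side_lines(characters)
--     total = 0
--     for line in lines: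
--         total += len(line) ** 2
--     return total
-- ===== SOURCE B (Python) =====
-- def count_all_characters_of_the_pyramid(characters):
--     """Returns number of all chars."""
--     if not characters:
--         return -1
--     n = len(characters)
--     return n * (2 * n - 1) * (2 * n + 1) // 3
-- ===== Notes on version B (the rewrite author's own statement) =====
-- stated objective: faster
-- what changed: Replaces building every pyramid line and summing squared lengths with the closed form n(2n-1)(2n+1)/3 for the sum of the first n odd squares.
import Mathlib
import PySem

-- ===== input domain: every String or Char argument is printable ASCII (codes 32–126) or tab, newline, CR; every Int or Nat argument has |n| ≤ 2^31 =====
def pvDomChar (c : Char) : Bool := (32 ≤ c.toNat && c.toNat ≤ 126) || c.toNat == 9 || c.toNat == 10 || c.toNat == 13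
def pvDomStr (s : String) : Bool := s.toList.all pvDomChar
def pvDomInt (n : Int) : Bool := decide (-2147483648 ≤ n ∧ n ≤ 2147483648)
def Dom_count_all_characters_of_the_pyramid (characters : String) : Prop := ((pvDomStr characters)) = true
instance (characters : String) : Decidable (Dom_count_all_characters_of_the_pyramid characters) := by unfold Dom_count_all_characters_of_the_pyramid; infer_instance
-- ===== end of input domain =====

-- B replaces A's construction of every pyramid line (and summing squared lengths)
-- by the closed form n(2n-1)(2n+1)//3 for the sum of the first n odd squares.

-- ===== PORT A =====
-- get_side_lines: while the string is non-empty, append last-char repeated num_characters,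
-- num_characters += 2, drop the last character.  (Only called on non-empty strings.)
def pvGetSideLines (cs : List Char) (num_characters : Nat) : List (List Char) :=
  match h : cs with
  | [] => []
  | _ :: _ =>
      (List.replicate num_characters (cs.getLast (by simp [h]))) ::
        pvGetSideLines cs.dropLast (num_characters + 2)
termination_by cs.length
decreasing_by simp [h]

def count_all_characters_of_the_pyramid (characters : String) : Int :=
  let cs := characters.toList
  if cs = [] then -1
  else
    (pvGetSideLines cs 1).foldl (fun total line => total + (line.length : Int) ^ 2) 0

-- ===== PORT B =====
def count_all_characters_of_the_pyramid_alt (characters : String) : Int :=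
  let cs := characters.toList
  if cs = [] then -1
  else
    let n : Int := cs.length
    PySem.Int.floordiv (n * (2 * n - 1) * (2 * n + 1)) 3

-- ===== PRECONDITION & SPEC =====
def Spec_count_all_characters_of_the_pyramid (characters : String) (out : Int) : Prop := out = count_all_characters_of_the_pyramid_alt characters
instance (characters : String) (out : Int) : Decidable (Spec_count_all_characters_of_the_pyramid characters out) := by unfold Spec_count_all_characters_of_the_pyramid; infer_instance

-- ===== CLAIM (what is proved, stated in full; the proofs are below) =====
def Claim_equal_count_all_characters_of_the_pyramid : Prop := ∀ (characters : String), Dom_count_all_characters_of_the_pyramid characters → Spec_count_all_characters_of_the_pyramid characters (count_all_characters_of_the_pyramid characters)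

-- ===== LEMMAS AND PROOFS =====

-- abstract sum of squared line lengths: S n num = num² + (num+2)² + … (n terms)
def pvS : Nat → Nat → Int
  | 0, _ => 0
  | n + 1, num => (num : Int) ^ 2 + pvS n (num + 2)

theorem pvGetSideLines_foldl (n : Nat) :
    ∀ (cs : List Char) (num : Nat) (t : Int), cs.length = n →
      (pvGetSideLines cs num).foldl (fun total line => total + (line.length : Int) ^ 2) t
        = t + pvS n num := by
  induction n with
  | zero =>
      intro cs num t h
      have : cs = [] := List.length_eq_zero_iff.mp h
      subst this
      simp [pvGetSideLines, pvS]
  | succ n ih =>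
      intro cs num t h
      match cs with
      | c :: cs' =>
        rw [pvGetSideLines]
        simp only [List.foldl_cons, List.length_replicate]
        rw [ih _ (num + 2) _ (by simp_all [List.length_dropLast])]
        simp [pvS]; ring
theorem pvS_closed (n : Nat) : ∀ num : Nat,
    3 * pvS n num = 3 * n * (num : Int) ^ 2 + 6 * num * n * ((n : Int) - 1)
      + 2 * n * ((n : Int) - 1) * (2 * n - 1) := by
  induction n with
  | zero => intro num; simp [pvS]
  | succ n ih =>
      intro num
      rw [pvS, mul_add, ih (num + 2)]
      push_cast
      ring

theorem count_all_characters_of_the_pyramid_spec : Claim_equal_count_all_characters_of_the_pyramid := by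
  intro characters _
  unfold Spec_count_all_characters_of_the_pyramid
  unfold count_all_characters_of_the_pyramid count_all_characters_of_the_pyramid_alt
  by_cases h : characters.toList = []
  · simp [h]
  · simp only [h, if_false]
    rw [pvGetSideLines_foldl characters.toList.length characters.toList 1 0 rfl]
    have h3 : (3 : Int) > 0 := by norm_num
    rw [PySem.Int.floordiv_eq_ediv_of_pos h3]
    have hc := pvS_closed characters.toList.length 1
    set n : Int := (characters.toList.length : Int) with hn
    have : n * (2 * n - 1) * (2 * n + 1) = 3 * pvS characters.toList.length 1 := by
      rw [hc]; push_cast; ring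
    rw [this, Int.mul_ediv_cancel_left _ (by norm_num)]
    ring

-- ===== VERDICT (by name: the statement is the Claim_ definition above) =====
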